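-- pv_equiv track=rewrite | github.com/kgirtz/AdventOfCode | AoC2019/Day 22/Day 22.py | compress_technique_list
-- ===== SOURCE A (Python) =====
-- from typing import Sequence
--
-- def compress_technique_list(techniques: Sequence[str], deck_len: int) -> tuple[int, int]:
--     a: int = 1
--     b: int = 0
--     for technique, amount in techniques:
--         match technique:
--             case 's':
--                 a = -a % deck_len
--                 b = -(b + 1) % deck_len
--             case 'i':
--                 a = (a * amount) % deck_len
--                 b = (b * amount) % deck_len
--             case 'c':
--                 b = (b - amount) % deck_len
--     return a, b
-- ===== SOURCE B (Python) =====
-- from functools import reduce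
--
--
-- def compress_technique_list(techniques, deck_len):
--     def linear_map(step):
--         technique, amount = step
--         if technique == 's':
--             return (-1, -1)
--         if technique == 'i':
--             return (amount, 0)
--         if technique == 'c':
--             return (1, -amount)
--         return None
--
--     def compose(f, g):
--         a, b = f
--         c, d = g
--         return ((c * a) % deck_len, (c * b + d) % deck_len)
--
--     maps = [m for m in map(linear_map, techniques) if m is not None]
--     return reduce(compose, maps, (1, 0))
-- ===== Notes on version B (the rewrite author's own statement) =====
-- stated objective: alternative
-- what changed: B maps each technique to an explicit modular linear map ('s'->(-1,-1), 'i'->(amount,0), 'c'->(1,-amount), unknown skipped) and folds them with one generic composition via functools.reduce, replacing A's inline per-case accumulator updates.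
-- intended difference: On degenerate decks (deck_len = 1 or negative) whose list contains a 'c' but no 's'/'i', A returns the first coefficient un-reduced as 1 while B returns the canonical residue 1 % deck_len; B's reduced coefficient is the intended value for a map stated modulo deck_len. — e.g. on compress_technique_list([("c", 1)], 1): A returns (1, 0), B returns (0, 0)
import Mathlib
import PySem

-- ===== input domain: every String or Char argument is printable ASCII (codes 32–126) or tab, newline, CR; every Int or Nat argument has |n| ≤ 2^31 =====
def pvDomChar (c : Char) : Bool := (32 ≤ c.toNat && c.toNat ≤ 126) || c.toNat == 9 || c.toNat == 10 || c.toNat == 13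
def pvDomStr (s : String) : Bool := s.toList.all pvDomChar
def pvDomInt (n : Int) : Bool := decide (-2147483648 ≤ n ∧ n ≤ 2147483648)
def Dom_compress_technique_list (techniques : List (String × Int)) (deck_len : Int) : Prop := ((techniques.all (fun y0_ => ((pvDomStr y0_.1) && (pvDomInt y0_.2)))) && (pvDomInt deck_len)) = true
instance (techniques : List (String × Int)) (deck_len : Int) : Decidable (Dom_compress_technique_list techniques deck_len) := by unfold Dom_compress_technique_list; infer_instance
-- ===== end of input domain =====

-- B replaces A's inline per-case accumulator updates by a per-technique linear map
-- plus a generic modular-composition reduce (objective: alternative decomposition, same O(n) cost).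

-- ===== PORT A =====
-- one iteration of A's for-loop (match technique: 's'/'i'/'c'/other)
def pvStepA (deck_len : Int) (st : Int × Int) (t : String × Int) : Int × Int :=
  if t.1 = "s" then (PySem.Int.mod (-st.1) deck_len, PySem.Int.mod (-(st.2 + 1)) deck_len)
  else if t.1 = "i" then (PySem.Int.mod (st.1 * t.2) deck_len, PySem.Int.mod (st.2 * t.2) deck_len)
  else if t.1 = "c" then (st.1, PySem.Int.mod (st.2 - t.2) deck_len)
  else st

def compress_technique_list (techniques : List (String × Int)) (deck_len : Int) : Int × Int :=
  techniques.foldl (pvStepA deck_len) (1, 0)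

-- ===== PORT B =====
-- linear_map: technique → Option (modular linear map), None for unknown techniques
def pvLinearMap (t : String × Int) : Option (Int × Int) :=
  if t.1 = "s" then some (-1, -1)
  else if t.1 = "i" then some (t.2, 0)
  else if t.1 = "c" then some (1, -t.2)
  else none

-- compose(f, g): apply f first, then g, coefficients reduced mod deck_len
def pvCompose (deck_len : Int) (f g : Int × Int) : Int × Int :=
  (PySem.Int.mod (g.1 * f.1) deck_len, PySem.Int.mod (g.1 * f.2 + g.2) deck_len)

def compress_technique_list_alt (techniques : List (String × Int)) (deck_len : Int) : Int × Int :=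
  ((techniques.map pvLinearMap).filterMap id).foldl (pvCompose deck_len) (1, 0)

-- ===== PRECONDITION & SPEC =====
-- Pre_ excludes exactly the inputs where A raises ZeroDivisionError: deck_len = 0 with some 's'/'i'/'c' technique present.
def Pre_compress_technique_list (techniques : List (String × Int)) (deck_len : Int) : Prop :=
  deck_len ≠ 0 ∨ ∀ t ∈ techniques, t.1 ≠ "s" ∧ t.1 ≠ "i" ∧ t.1 ≠ "c"
instance (techniques : List (String × Int)) (deck_len : Int) : Decidable (Pre_compress_technique_list techniques deck_len) := by unfold Pre_compress_technique_list; infer_instance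
def pvWitness_compress_technique_list : (List (String × Int)) × Int := ([("s", 0), ("i", 3), ("c", 2)], 10)

-- On degenerate decks (deck_len = 1 or negative) whose technique list contains a 'cut' but no 'deal into new
-- stack'/'deal with increment', A returns the first coefficient un-reduced as 1 while B returns the canonical
-- residue 1 % deck_len, which is the intended value for a coefficient stated modulo deck_len.
def D_compress_technique_list (techniques : List (String × Int)) (deck_len : Int) : Prop :=
  (deck_len = 1 ∨ deck_len < 0) ∧ (∀ t ∈ techniques, t.1 ≠ "s" ∧ t.1 ≠ "i") ∧ (∃ t ∈ techniques, t.1 = "c")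
instance (techniques : List (String × Int)) (deck_len : Int) : Decidable (D_compress_technique_list techniques deck_len) := by unfold D_compress_technique_list; infer_instance

def Spec_compress_technique_list (techniques : List (String × Int)) (deck_len : Int) (out : Int × Int) : Prop := ¬ D_compress_technique_list techniques deck_len → out = compress_technique_list_alt techniques deck_len
instance (techniques : List (String × Int)) (deck_len : Int) (out : Int × Int) : Decidable (Spec_compress_technique_list techniques deck_len out) := by unfold Spec_compress_technique_list; infer_instance

def pvDiffWitness_compress_technique_list : (List (String × Int)) × Int := ([("c", 1)], 1)
def pvDiffWitnessOut_compress_technique_list : (Int × Int) × (Int × Int) := ((1, 0), (0, 0))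

-- ===== CLAIM (what is proved, stated in full; the proofs are below) =====
def Claim_unchanged_compress_technique_list : Prop := ∀ (techniques : List (String × Int)) (deck_len : Int), Dom_compress_technique_list techniques deck_len → Pre_compress_technique_list techniques deck_len → Spec_compress_technique_list techniques deck_len (compress_technique_list techniques deck_len)
def Claim_changed_compress_technique_list : Prop := Dom_compress_technique_list (pvDiffWitness_compress_technique_list.1) (pvDiffWitness_compress_technique_list.2) ∧ Pre_compress_technique_list (pvDiffWitness_compress_technique_list.1) (pvDiffWitness_compress_technique_list.2) ∧ D_compress_technique_list (pvDiffWitness_compress_technique_list.1) (pvDiffWitness_compress_technique_list.2) ∧ compress_technique_list (pvDiffWitness_compress_technique_list.1) (pvDiffWitness_compress_technique_list.2) = pvDiffWitnessOut_compress_technique_list.1 ∧ compress_technique_list_alt (pvDiffWitness_compress_technique_list.1) (pvDiffWitness_compress_technique_list.2) = pvDiffWitnessOut_compress_technique_list.2 ∧ pvDiffWitnessOut_compress_technique_list.1 ≠ pvDiffWitnessOut_compress_technique_list.2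
def Claim_exact_compress_technique_list : Prop := ∀ (techniques : List (String × Int)) (deck_len : Int), Dom_compress_technique_list techniques deck_len → Pre_compress_technique_list techniques deck_len → D_compress_technique_list techniques deck_len → compress_technique_list techniques deck_len ≠ compress_technique_list_alt techniques deck_len

-- ===== LEMMAS AND PROOFS =====

-- abbreviate the two folds
theorem pv_foldA_cons (n : Int) (t : String × Int) (l : List (String × Int)) (st : Int × Int) :
    (t :: l).foldl (pvStepA n) st = l.foldl (pvStepA n) (pvStepA n st t) := rfl

theorem pv_foldB_cons (n : Int) (t : String × Int) (l : List (String × Int)) (st : Int × Int) :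
    (((t :: l).map pvLinearMap).filterMap id).foldl (pvCompose n) st =
      ((l.map pvLinearMap).filterMap id).foldl (pvCompose n)
        (match pvLinearMap t with | some g => pvCompose n st g | none => st) := by
  simp only [List.map_cons, List.filterMap_cons]
  cases h : pvLinearMap t <;> simp [h]

-- M2: multiplying by a reduced residue agrees with multiplying by the original
theorem pv_mul_fmod_right (c x n : Int) : (c * (x.fmod n)).fmod n = (c * x).fmod n := by
  rw [Int.mul_fmod c (x.fmod n) n, Int.fmod_fmod, ← Int.mul_fmod]

-- L0: techniques with no 's'/'i'/'c' entry leave both programs' states untouched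
theorem pv_foldA_id (n : Int) (l : List (String × Int)) (st : Int × Int)
    (h : ∀ t ∈ l, t.1 ≠ "s" ∧ t.1 ≠ "i" ∧ t.1 ≠ "c") : l.foldl (pvStepA n) st = st := by
  induction l generalizing st with
  | nil => rfl
  | cons t l ih =>
    obtain ⟨h1, h2, h3⟩ := h t (by simp)
    rw [pv_foldA_cons]
    have : pvStepA n st t = st := by simp [pvStepA, h1, h2, h3]
    rw [this]
    exact ih _ fun u hu => h u (by simp [hu])

theorem pv_foldB_id (n : Int) (l : List (String × Int)) (st : Int × Int)
    (h : ∀ t ∈ l, t.1 ≠ "s" ∧ t.1 ≠ "i" ∧ t.1 ≠ "c") :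
    ((l.map pvLinearMap).filterMap id).foldl (pvCompose n) st = st := by
  induction l generalizing st with
  | nil => rfl
  | cons t l ih =>
    obtain ⟨h1, h2, h3⟩ := h t (by simp)
    rw [pv_foldB_cons]
    have : pvLinearMap t = none := by simp [pvLinearMap, h1, h2, h3]
    rw [this]
    exact ih _ fun u hu => h u (by simp [hu])

-- L3: from a common state whose first component is reduced, the two folds agree
theorem pv_fold_eq_of_red (n : Int) (l : List (String × Int)) (a b : Int)
    (ha : (a.fmod n) = a) :
    ((l.map pvLinearMap).filterMap id).foldl (pvCompose n) (a, b) = l.foldl (pvStepA n) (a, b) := by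
  induction l generalizing a b with
  | nil => rfl
  | cons t l ih =>
    rw [pv_foldA_cons, pv_foldB_cons]
    by_cases hs : t.1 = "s"
    · have hA : pvStepA n (a, b) t = ((-a).fmod n, (-(b + 1)).fmod n) := by
        simp [pvStepA, hs, PySem.Int.mod]
      have hB : (match pvLinearMap t with | some g => pvCompose n (a, b) g | none => (a, b)) =
          ((-a).fmod n, (-(b + 1)).fmod n) := by
        simp only [pvLinearMap, hs, if_pos]
        simp [pvCompose, PySem.Int.mod]
        first | (exact ⟨trivial, trivial⟩) | trivial | (congr 1 <;> ring) | (constructor <;> (first | (exact ⟨trivial, trivial⟩) | trivial | (congr 1 <;> ring)))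
      rw [hA, hB]; exact ih _ _ (Int.fmod_fmod _ _)
    · by_cases hi : t.1 = "i"
      · have hA : pvStepA n (a, b) t = ((a * t.2).fmod n, (b * t.2).fmod n) := by
          simp [pvStepA, hs, hi, PySem.Int.mod]
        have hB : (match pvLinearMap t with | some g => pvCompose n (a, b) g | none => (a, b)) =
            ((a * t.2).fmod n, (b * t.2).fmod n) := by
          simp [pvLinearMap, hi, pvCompose, PySem.Int.mod]
          constructor <;> (congr 1 <;> ring)
        rw [hA, hB]; exact ih _ _ (Int.fmod_fmod _ _)
      · by_cases hc : t.1 = "c"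
        · have hA : pvStepA n (a, b) t = (a, (b - t.2).fmod n) := by
            simp [pvStepA, hs, hi, hc, PySem.Int.mod]
          have hB : (match pvLinearMap t with | some g => pvCompose n (a, b) g | none => (a, b)) =
              (a, (b - t.2).fmod n) := by
            simp only [pvLinearMap, hs, hi, hc, if_neg, if_pos]
            simp [pvCompose, PySem.Int.mod, ha]
            all_goals (first | rfl | (congr 1 <;> ring) | (constructor <;> (first | rfl | (congr 1 <;> ring))))
          rw [hA, hB]; exact ih _ _ ha
        · have hA : pvStepA n (a, b) t = (a, b) := by simp [pvStepA, hs, hi, hc]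
          have hB : pvLinearMap t = none := by simp [pvLinearMap, hs, hi, hc]
          rw [hA, hB]; exact ih _ _ ha

-- L5: with the A-state's first component still the initial 1 and the B-state holding 1.fmod n,
-- the folds agree as soon as some 's'/'i' technique occurs in the list
theorem pv_fold_eq_of_pending (n : Int) (l : List (String × Int)) (b : Int)
    (hsi : ∃ t ∈ l, t.1 = "s" ∨ t.1 = "i") :
    ((l.map pvLinearMap).filterMap id).foldl (pvCompose n) ((1 : Int).fmod n, b) =
      l.foldl (pvStepA n) (1, b) := by
  induction l generalizing b with
  | nil => simp at hsi
  | cons t l ih =>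
    rw [pv_foldA_cons, pv_foldB_cons]
    by_cases hs : t.1 = "s"
    · have hA : pvStepA n (1, b) t = ((-1 : Int).fmod n, (-(b + 1)).fmod n) := by
        simp [pvStepA, hs, PySem.Int.mod]
      have hB : (match pvLinearMap t with | some g => pvCompose n ((1 : Int).fmod n, b) g | none => ((1 : Int).fmod n, b)) =
          ((-1 : Int).fmod n, (-(b + 1)).fmod n) := by
        simp only [pvLinearMap, hs, if_pos]
        simp only [pvCompose, PySem.Int.mod]
        have h1 : ((-1 : Int) * ((1 : Int).fmod n)).fmod n = ((-1 : Int) * 1).fmod n :=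
          pv_mul_fmod_right _ _ _
        simp only [h1]
        norm_num
        all_goals (first | rfl | (congr 1 <;> ring) | (constructor <;> (first | rfl | (congr 1 <;> ring))))
      rw [hA, hB]; exact pv_fold_eq_of_red n l _ _ (Int.fmod_fmod _ _)
    · by_cases hi' : t.1 = "i"
      · have hA : pvStepA n (1, b) t = ((1 * t.2).fmod n, (b * t.2).fmod n) := by
          simp [pvStepA, hs, hi', PySem.Int.mod]
        have hB : (match pvLinearMap t with | some g => pvCompose n ((1 : Int).fmod n, b) g | none => ((1 : Int).fmod n, b)) =
            ((1 * t.2).fmod n, (b * t.2).fmod n) := by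
          have h1 : (t.2 * ((1 : Int).fmod n)).fmod n = (t.2 * 1).fmod n :=
            pv_mul_fmod_right _ _ _
          simp [pvLinearMap, hi', pvCompose, PySem.Int.mod, h1]
          all_goals (first | rfl | (congr 1 <;> ring) | (constructor <;> (first | rfl | (congr 1 <;> ring))))
        rw [hA, hB]; exact pv_fold_eq_of_red n l _ _ (Int.fmod_fmod _ _)
      · have hsi' : ∃ u ∈ l, u.1 = "s" ∨ u.1 = "i" := by
          obtain ⟨u, hu, hu2⟩ := hsi
          rcases List.mem_cons.mp hu with h | h
          · subst h; rcases hu2 with h | h <;> [exact absurd h hs; exact absurd h hi']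
          · exact ⟨u, h, hu2⟩
        by_cases hc : t.1 = "c"
        · have hA : pvStepA n (1, b) t = (1, (b - t.2).fmod n) := by
            simp [pvStepA, hs, hi', hc]; simp [PySem.Int.mod]
          have hB : (match pvLinearMap t with | some g => pvCompose n ((1 : Int).fmod n, b) g | none => ((1 : Int).fmod n, b)) =
              ((1 : Int).fmod n, (b - t.2).fmod n) := by
            simp [pvLinearMap, hc, pvCompose, PySem.Int.mod, Int.fmod_fmod]
            all_goals (first | rfl | (congr 1 <;> ring) | (constructor <;> (first | rfl | (congr 1 <;> ring))))
          rw [hA, hB]; exact ih _ hsi'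
        · have hA : pvStepA n (1, b) t = (1, b) := by simp [pvStepA, hs, hi', hc]
          have hB : pvLinearMap t = none := by simp [pvLinearMap, hs, hi', hc]
          rw [hA, hB]; exact ih _ hsi'

-- L4: starting from the common initial state, the folds agree whenever the list
-- either contains some 's'/'i' technique or contains no 'c' technique
theorem pv_fold_eq_main (n : Int) (l : List (String × Int)) (b : Int)
    (h : (∃ t ∈ l, t.1 = "s" ∨ t.1 = "i") ∨ ∀ t ∈ l, t.1 ≠ "c") :
    ((l.map pvLinearMap).filterMap id).foldl (pvCompose n) (1, b) = l.foldl (pvStepA n) (1, b) := by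
  induction l generalizing b with
  | nil => rfl
  | cons t l ih =>
    rw [pv_foldA_cons, pv_foldB_cons]
    by_cases hs : t.1 = "s"
    · have hA : pvStepA n (1, b) t = ((-1 : Int).fmod n, (-(b + 1)).fmod n) := by
        simp [pvStepA, hs, PySem.Int.mod]
      have hB : (match pvLinearMap t with | some g => pvCompose n (1, b) g | none => ((1 : Int), b)) =
          ((-1 : Int).fmod n, (-(b + 1)).fmod n) := by
        simp only [pvLinearMap, hs, if_pos]
        simp only [pvCompose, PySem.Int.mod]
        norm_num
        all_goals (first | rfl | (congr 1 <;> ring) | (constructor <;> (first | rfl | (congr 1 <;> ring))))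
      rw [hA, hB]; exact pv_fold_eq_of_red n l _ _ (Int.fmod_fmod _ _)
    · by_cases hi' : t.1 = "i"
      · have hA : pvStepA n (1, b) t = ((1 * t.2).fmod n, (b * t.2).fmod n) := by
          simp [pvStepA, hs, hi', PySem.Int.mod]
        have hB : (match pvLinearMap t with | some g => pvCompose n (1, b) g | none => ((1 : Int), b)) =
            ((1 * t.2).fmod n, (b * t.2).fmod n) := by
          simp [pvLinearMap, hi', pvCompose, PySem.Int.mod]
          all_goals (first | rfl | (congr 1 <;> ring) | (constructor <;> (first | rfl | (congr 1 <;> ring))))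
        rw [hA, hB]; exact pv_fold_eq_of_red n l _ _ (Int.fmod_fmod _ _)
      · by_cases hc : t.1 = "c"
        · have hsi : ∃ u ∈ l, u.1 = "s" ∨ u.1 = "i" := by
            rcases h with ⟨u, hu, hu2⟩ | hnoc
            · rcases List.mem_cons.mp hu with h' | h'
              · subst h'; rcases hu2 with h' | h' <;> [exact absurd h' hs; exact absurd h' hi']
              · exact ⟨u, h', hu2⟩
            · exact absurd hc (hnoc t (by simp))
          have hA : pvStepA n (1, b) t = (1, (b - t.2).fmod n) := by
            simp [pvStepA, hs, hi', hc]; simp [PySem.Int.mod]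
          have hB : (match pvLinearMap t with | some g => pvCompose n (1, b) g | none => ((1 : Int), b)) =
              ((1 : Int).fmod n, (b - t.2).fmod n) := by
            simp [pvLinearMap, hs, hi', hc, pvCompose, PySem.Int.mod]
            all_goals (first | rfl | (congr 1 <;> ring) | (constructor <;> (first | rfl | (congr 1 <;> ring))))
          rw [hA, hB]; exact pv_fold_eq_of_pending n l _ hsi
        · have hA : pvStepA n (1, b) t = (1, b) := by simp [pvStepA, hs, hi', hc]
          have hB : pvLinearMap t = none := by simp [pvLinearMap, hs, hi', hc]
          rw [hA, hB]
          refine ih _ ?_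
          rcases h with ⟨u, hu, hu2⟩ | hnoc
          · rcases List.mem_cons.mp hu with h' | h'
            · subst h'; rcases hu2 with h' | h' <;> [exact absurd h' hs; exact absurd h' hi']
            · exact Or.inl ⟨u, h', hu2⟩
          · exact Or.inr fun u hu => hnoc u (by simp [hu])

-- first component of A's fold is unchanged when no 's'/'i' technique occurs
theorem pv_foldA_fst (n : Int) (l : List (String × Int)) (st : Int × Int)
    (h : ∀ t ∈ l, t.1 ≠ "s" ∧ t.1 ≠ "i") : (l.foldl (pvStepA n) st).1 = st.1 := by
  induction l generalizing st with
  | nil => rfl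
  | cons t l ih =>
    obtain ⟨h1, h2⟩ := h t (by simp)
    rw [pv_foldA_cons]
    have hrest := ih (pvStepA n st t) fun u hu => h u (by simp [hu])
    rw [hrest]
    by_cases hc : t.1 = "c" <;> simp [pvStepA, h1, h2, hc]

-- first component of B's fold: reduced once a 'c' occurs (no 's'/'i' present)
theorem pv_foldB_fst (n : Int) (l : List (String × Int)) (a b : Int)
    (h : ∀ t ∈ l, t.1 ≠ "s" ∧ t.1 ≠ "i") (hc : ∃ t ∈ l, t.1 = "c") :
    (((l.map pvLinearMap).filterMap id).foldl (pvCompose n) (a, b)).1 = a.fmod n := by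
  induction l generalizing a b with
  | nil => simp at hc
  | cons t l ih =>
    obtain ⟨h1, h2⟩ := h t (by simp)
    rw [pv_foldB_cons]
    by_cases htc : t.1 = "c"
    · have hB : pvLinearMap t = some (1, -t.2) := by simp [pvLinearMap, h1, h2, htc]
      rw [hB]
      simp only [pvCompose, PySem.Int.mod, one_mul]
      by_cases hrest : ∃ u ∈ l, u.1 = "c"
      · rw [ih _ _ (fun u hu => h u (by simp [hu])) hrest, Int.fmod_fmod]
      · have : ∀ u ∈ l, u.1 ≠ "s" ∧ u.1 ≠ "i" ∧ u.1 ≠ "c" := by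
          intro u hu
          exact ⟨(h u (by simp [hu])).1, (h u (by simp [hu])).2, fun hce => hrest ⟨u, hu, hce⟩⟩
        rw [pv_foldB_id n l _ this]
    · have hB : pvLinearMap t = none := by simp [pvLinearMap, h1, h2, htc]
      rw [hB]
      have hc' : ∃ u ∈ l, u.1 = "c" := by
        obtain ⟨u, hu, hu2⟩ := hc
        rcases List.mem_cons.mp hu with h' | h'
        · subst h'; exact absurd hu2 htc
        · exact ⟨u, h', hu2⟩
      exact ih _ _ (fun u hu => h u (by simp [hu])) hc'

-- 1 % n ≠ 1 when n = 1 or n < 0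
theorem pv_one_fmod_ne (n : Int) (h : n = 1 ∨ n < 0) : (1 : Int).fmod n ≠ 1 := by
  rcases h with h | h
  · subst h; decide
  · have hb := (PySem.Int.mod_neg_bounds 1 h).2
    simp only [PySem.Int.mod] at hb
    omega

-- ===== VERDICT (by name: the statement is the Claim_ definition above) =====
theorem compress_technique_list_spec : Claim_unchanged_compress_technique_list := by
  intro techniques deck_len _hdom hpre hnd
  unfold compress_technique_list compress_technique_list_alt
  by_cases hz : deck_len = 0
  · have hq : ∀ t ∈ techniques, t.1 ≠ "s" ∧ t.1 ≠ "i" ∧ t.1 ≠ "c" := by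
      rcases hpre with h | h
      · exact absurd hz h
      · exact h
    rw [pv_foldA_id _ _ _ hq, pv_foldB_id _ _ _ hq]
  · by_cases hdeg : deck_len = 1 ∨ deck_len < 0
    · -- degenerate modulus: ¬D gives some 's'/'i' or no 'c'
      unfold D_compress_technique_list at hnd
      refine (pv_fold_eq_main deck_len techniques 0 ?_).symm
      by_cases hsi : ∃ t ∈ techniques, t.1 = "s" ∨ t.1 = "i"
      · exact Or.inl hsi
      · push_neg at hsi
        exact Or.inr fun t ht hce => hnd ⟨hdeg, fun u hu => hsi u hu, ⟨t, ht, hce⟩⟩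
    · -- deck_len ≥ 2: initial first component already reduced
      push_neg at hdeg
      have h2 : (2 : Int) ≤ deck_len := by omega
      have h1 : (1 : Int).fmod deck_len = 1 := by
        rw [Int.fmod_eq_emod]
        simp only [if_pos (Or.inl (by omega : (0:Int) ≤ deck_len)), add_zero]
        exact Int.emod_eq_of_lt (by norm_num) (by omega)
      exact (pv_fold_eq_of_red deck_len techniques 1 0 h1).symm

theorem compress_technique_list_changed : Claim_changed_compress_technique_list := by
  unfold Claim_changed_compress_technique_list; decide

theorem compress_technique_list_tight : Claim_exact_compress_technique_list := by
  intro techniques deck_len _hdom _hpre hd heq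
  obtain ⟨hdeg, hnosi, hc⟩ := hd
  have hA : (compress_technique_list techniques deck_len).1 = 1 :=
    pv_foldA_fst deck_len techniques (1, 0) hnosi
  have hB : (compress_technique_list_alt techniques deck_len).1 = (1 : Int).fmod deck_len :=
    pv_foldB_fst deck_len techniques 1 0 hnosi hc
  rw [heq, hB] at hA
  exact pv_one_fmod_ne deck_len hdeg hA
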